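-- pv_equiv track=rewrite | github.com/mortyc126-debug/rayon | tension/rayon_cancel.py | sha256_nr
-- ===== SOURCE A (Python) =====
-- M32 = 0xFFFFFFFF
--
-- K256 = [
--     0x428a2f98,0x71374491,0xb5c0fbcf,0xe9b5dba5,
--     0x3956c25b,0x59f111f1,0x923f82a4,0xab1c5ed5,
--     0xd807aa98,0x12835b01,0x243185be,0x550c7dc3,
--     0x72be5d74,0x80deb1fe,0x9bdc06a7,0xc19bf174,
--     0xe49b69c1,0xefbe4786,0x0fc19dc6,0x240ca1cc,
--     0x2de92c6f,0x4a7484aa,0x5cb0a9dc,0x76f988da,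
--     0x983e5152,0xa831c66d,0xb00327c8,0xbf597fc7,
--     0xc6e00bf3,0xd5a79147,0x06ca6351,0x14292967,
--     0x27b70a85,0x2e1b2138,0x4d2c6dfc,0x53380d13,
--     0x650a7354,0x766a0abb,0x81c2c92e,0x92722c85,
--     0xa2bfe8a1,0xa81a664b,0xc24b8b70,0xc76c51a3,
--     0xd192e819,0xd6990624,0xf40e3585,0x106aa070,
--     0x19a4c116,0x1e376c08,0x2748774c,0x34b0bcb5,
--     0x391c0cb3,0x4ed8aa4a,0x5b9cca4f,0x682e6ff3,
--     0x748f82ee,0x78a5636f,0x84c87814,0x8cc70208,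
--     0x90befffa,0xa4506ceb,0xbef9a3f7,0xc67178f2,
-- ]
--
-- IV = (0x6a09e667,0xbb67ae85,0x3c6ef372,0xa54ff53a,
--       0x510e527f,0x9b05688c,0x1f83d9ab,0x5be0cd19)
--
-- def rotr(x, n):
--     return ((x >> n) | (x << (32 - n))) & M32
--
-- def sha256_nr(W, n_rounds):
--     Ws = list(W[:16])
--     for i in range(16, max(n_rounds, 16)):
--         s0 = rotr(Ws[i-15],7)^rotr(Ws[i-15],18)^(Ws[i-15]>>3)
--         s1 = rotr(Ws[i-2],17)^rotr(Ws[i-2],19)^(Ws[i-2]>>10)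
--         Ws.append((Ws[i-16]+s0+Ws[i-7]+s1)&M32)
--     a,b,c,d,e,f,g,h = IV
--     for r in range(n_rounds):
--         S1=rotr(e,6)^rotr(e,11)^rotr(e,25)
--         ch=(e&f)^((~e)&g)&M32
--         t1=(h+S1+ch+K256[r]+Ws[r])&M32
--         S0=rotr(a,2)^rotr(a,13)^rotr(a,22)
--         mj=(a&b)^(a&c)^(b&c)
--         t2=(S0+mj)&M32
--         h,g,f,e=g,f,e,(d+t1)&M32
--         d,c,b,a=c,b,a,(t1+t2)&M32
--     return tuple((IV[i]+x)&M32 for i,x in enumerate([a,b,c,d,e,f,g,h]))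
-- ===== SOURCE B (Python) =====
-- M32 = 0xFFFFFFFF
--
-- K256 = [
--     0x428a2f98,0x71374491,0xb5c0fbcf,0xe9b5dba5,
--     0x3956c25b,0x59f111f1,0x923f82a4,0xab1c5ed5,
--     0xd807aa98,0x12835b01,0x243185be,0x550c7dc3,
--     0x72be5d74,0x80deb1fe,0x9bdc06a7,0xc19bf174,
--     0xe49b69c1,0xefbe4786,0x0fc19dc6,0x240ca1cc,
--     0x2de92c6f,0x4a7484aa,0x5cb0a9dc,0x76f988da,
--     0x983e5152,0xa831c66d,0xb00327c8,0xbf597fc7,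
--     0xc6e00bf3,0xd5a79147,0x06ca6351,0x14292967,
--     0x27b70a85,0x2e1b2138,0x4d2c6dfc,0x53380d13,
--     0x650a7354,0x766a0abb,0x81c2c92e,0x92722c85,
--     0xa2bfe8a1,0xa81a664b,0xc24b8b70,0xc76c51a3,
--     0xd192e819,0xd6990624,0xf40e3585,0x106aa070,
--     0x19a4c116,0x1e376c08,0x2748774c,0x34b0bcb5,
--     0x391c0cb3,0x4ed8aa4a,0x5b9cca4f,0x682e6ff3,
--     0x748f82ee,0x78a5636f,0x84c87814,0x8cc70208,
--     0x90befffa,0xa4506ceb,0xbef9a3f7,0xc67178f2,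
-- ]
--
-- IV = (0x6a09e667,0xbb67ae85,0x3c6ef372,0xa54ff53a,
--       0x510e527f,0x9b05688c,0x1f83d9ab,0x5be0cd19)
--
-- def rotr(x, n):
--     return ((x >> n) | (x << (32 - n))) & M32
--
-- def _sig0(x):
--     return rotr(x, 7) ^ rotr(x, 18) ^ (x >> 3)
--
-- def _sig1(x):
--     return rotr(x, 17) ^ rotr(x, 19) ^ (x >> 10)
--
-- def _extend(ws, count):
--     # recursively append `count` schedule words, each built from the last 16
--     if count == 0:
--         return ws
--     w = (ws[-16] + _sig0(ws[-15]) + ws[-7] + _sig1(ws[-2])) & M32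
--     return _extend(ws + [w], count - 1)
--
-- def _ch(e, f, g):
--     return (e & f) ^ (~e & g & M32)
--
-- def _maj(a, b, c):
--     return (a & b) ^ (a & c) ^ (b & c)
--
-- def _bsig0(a):
--     return rotr(a, 2) ^ rotr(a, 13) ^ rotr(a, 22)
--
-- def _bsig1(e):
--     return rotr(e, 6) ^ rotr(e, 11) ^ rotr(e, 25)
--
-- def _rounds(state, kws):
--     # recursive compression over the list of (round constant, schedule word) pairs
--     if not kws:
--         return state
--     (k, w), rest = kws[0], kws[1:]
--     a, b, c, d, e, f, g, h = state
--     t1 = (h + _bsig1(e) + _ch(e, f, g) + k + w) & M32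
--     t2 = (_bsig0(a) + _maj(a, b, c)) & M32
--     return _rounds(((t1 + t2) & M32, a, b, c, (d + t1) & M32, e, f, g), rest)
--
-- def sha256_nr(W, n_rounds):
--     ws = _extend(list(W[:16]), max(n_rounds, 16) - 16)
--     kws = [(K256[r], ws[r]) for r in range(n_rounds)]
--     state = _rounds(IV, kws)
--     return tuple((iv + x) & M32 for iv, x in zip(IV, state))
-- ===== Notes on version B (the rewrite author's own statement) =====
-- stated objective: alternative
-- what changed: B is a recursive decomposition: the schedule is extended by a recursive helper addressing the last 16 words with negative indices, rounds are a recursion over a precomputed list of (round-constant, schedule-word) pairs with the round core split into named ch/maj/Sigma helper functions, and the final addition zips IV with the state, replacing A's two inline index-driven for-loops.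
import Mathlib
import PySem

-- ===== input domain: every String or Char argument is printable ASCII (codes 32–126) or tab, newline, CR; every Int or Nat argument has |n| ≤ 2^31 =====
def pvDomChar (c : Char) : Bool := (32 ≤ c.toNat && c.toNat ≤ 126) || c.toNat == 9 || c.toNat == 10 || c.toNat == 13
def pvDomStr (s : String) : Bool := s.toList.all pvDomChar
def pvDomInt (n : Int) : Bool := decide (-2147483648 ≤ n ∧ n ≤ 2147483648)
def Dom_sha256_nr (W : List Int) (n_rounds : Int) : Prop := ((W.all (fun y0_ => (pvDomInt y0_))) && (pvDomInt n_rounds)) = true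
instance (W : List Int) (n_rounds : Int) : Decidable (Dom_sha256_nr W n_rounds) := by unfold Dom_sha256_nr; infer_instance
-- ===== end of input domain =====

-- B is a recursive decomposition (schedule extension by recursion with negative indexing,
-- rounds as a recursion over a list of (constant, word) pairs with named ch/maj/Sigma helpers,
-- final addition by zipping IV) replacing A's two inline index-driven loops; same cost.

-- shared module-level constants and the helper rotr (same in Source A and Source B)
def pvM32 : Int := 0xFFFFFFFF

def pvK256 : List Int := [
  0x428a2f98,0x71374491,0xb5c0fbcf,0xe9b5dba5,
  0x3956c25b,0x59f111f1,0x923f82a4,0xab1c5ed5,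
  0xd807aa98,0x12835b01,0x243185be,0x550c7dc3,
  0x72be5d74,0x80deb1fe,0x9bdc06a7,0xc19bf174,
  0xe49b69c1,0xefbe4786,0x0fc19dc6,0x240ca1cc,
  0x2de92c6f,0x4a7484aa,0x5cb0a9dc,0x76f988da,
  0x983e5152,0xa831c66d,0xb00327c8,0xbf597fc7,
  0xc6e00bf3,0xd5a79147,0x06ca6351,0x14292967,
  0x27b70a85,0x2e1b2138,0x4d2c6dfc,0x53380d13,
  0x650a7354,0x766a0abb,0x81c2c92e,0x92722c85,
  0xa2bfe8a1,0xa81a664b,0xc24b8b70,0xc76c51a3,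
  0xd192e819,0xd6990624,0xf40e3585,0x106aa070,
  0x19a4c116,0x1e376c08,0x2748774c,0x34b0bcb5,
  0x391c0cb3,0x4ed8aa4a,0x5b9cca4f,0x682e6ff3,
  0x748f82ee,0x78a5636f,0x84c87814,0x8cc70208,
  0x90befffa,0xa4506ceb,0xbef9a3f7,0xc67178f2]

def pvIV : List Int := [0x6a09e667,0xbb67ae85,0x3c6ef372,0xa54ff53a,
  0x510e527f,0x9b05688c,0x1f83d9ab,0x5be0cd19]

-- rotr(x, n) = ((x >> n) | (x << (32 - n))) & M32   (n is always a literal 0 < n < 32)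
def pvRotr (x : Int) (n : Nat) : Int :=
  PySem.Int.band (PySem.Int.bor (x >>> n) (x <<< (32 - n))) pvM32

-- ===== PORT A =====
def sha256_nr (W : List Int) (n_rounds : Int) : List Int :=
  let Ws0 := PySem.List.slice W none (some 16)
  let Ws := (PySem.List.pyRange 16 (max n_rounds 16) 1).foldl (fun Ws i =>
    let s0 := PySem.Int.bxor
      (PySem.Int.bxor (pvRotr (PySem.List.pyGetD Ws (i-15) 0) 7)
                      (pvRotr (PySem.List.pyGetD Ws (i-15) 0) 18))
      ((PySem.List.pyGetD Ws (i-15) 0) >>> (3:Nat))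
    let s1 := PySem.Int.bxor
      (PySem.Int.bxor (pvRotr (PySem.List.pyGetD Ws (i-2) 0) 17)
                      (pvRotr (PySem.List.pyGetD Ws (i-2) 0) 19))
      ((PySem.List.pyGetD Ws (i-2) 0) >>> (10:Nat))
    Ws ++ [PySem.Int.band (PySem.List.pyGetD Ws (i-16) 0 + s0 + PySem.List.pyGetD Ws (i-7) 0 + s1) pvM32]) Ws0
  let st := (PySem.List.pyRange 0 n_rounds 1).foldl (fun st r =>
    match st with
    | (a,b,c,d,e,f,g,h) =>
      let S1 := PySem.Int.bxor (PySem.Int.bxor (pvRotr e 6) (pvRotr e 11)) (pvRotr e 25)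
      let ch := PySem.Int.bxor (PySem.Int.band e f) (PySem.Int.band (PySem.Int.band (Int.not e) g) pvM32)
      let t1 := PySem.Int.band (h + S1 + ch + PySem.List.pyGetD pvK256 r 0 + PySem.List.pyGetD Ws r 0) pvM32
      let S0 := PySem.Int.bxor (PySem.Int.bxor (pvRotr a 2) (pvRotr a 13)) (pvRotr a 22)
      let mj := PySem.Int.bxor (PySem.Int.bxor (PySem.Int.band a b) (PySem.Int.band a c)) (PySem.Int.band b c)
      let t2 := PySem.Int.band (S0 + mj) pvM32
      (PySem.Int.band (t1+t2) pvM32, a, b, c, PySem.Int.band (d+t1) pvM32, e, f, g))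
    ((0x6a09e667 : Int), (0xbb67ae85 : Int), (0x3c6ef372 : Int), (0xa54ff53a : Int),
     (0x510e527f : Int), (0x9b05688c : Int), (0x1f83d9ab : Int), (0x5be0cd19 : Int))
  match st with
  | (a,b,c,d,e,f,g,h) =>
    (PySem.List.enumerate [a,b,c,d,e,f,g,h] 0).map
      (fun p => PySem.Int.band (PySem.List.pyGetD pvIV p.1 0 + p.2) pvM32)

-- ===== PORT B =====
-- Source B's helper functions, each a named definition exactly as in Source B
def pvSig0 (x : Int) : Int :=
  PySem.Int.bxor (PySem.Int.bxor (pvRotr x 7) (pvRotr x 18)) (x >>> (3:Nat))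

def pvSig1 (x : Int) : Int :=
  PySem.Int.bxor (PySem.Int.bxor (pvRotr x 17) (pvRotr x 19)) (x >>> (10:Nat))

-- _extend(ws, count): recursion on count, negative indices address the last 16 words
def pvExtendB : List Int → Nat → List Int
  | ws, 0 => ws
  | ws, Nat.succ count =>
    let w := PySem.Int.band
      (PySem.List.pyGetD ws (-16) 0 + pvSig0 (PySem.List.pyGetD ws (-15) 0)
        + PySem.List.pyGetD ws (-7) 0 + pvSig1 (PySem.List.pyGetD ws (-2) 0)) pvM32
    pvExtendB (ws ++ [w]) count

def pvCh (e f g : Int) : Int :=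
  PySem.Int.bxor (PySem.Int.band e f) (PySem.Int.band (PySem.Int.band (Int.not e) g) pvM32)

def pvMaj (a b c : Int) : Int :=
  PySem.Int.bxor (PySem.Int.bxor (PySem.Int.band a b) (PySem.Int.band a c)) (PySem.Int.band b c)

def pvBSig0 (a : Int) : Int :=
  PySem.Int.bxor (PySem.Int.bxor (pvRotr a 2) (pvRotr a 13)) (pvRotr a 22)

def pvBSig1 (e : Int) : Int :=
  PySem.Int.bxor (PySem.Int.bxor (pvRotr e 6) (pvRotr e 11)) (pvRotr e 25)

-- _rounds(state, kws): recursion on the pair list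
def pvRoundsB : (Int × Int × Int × Int × Int × Int × Int × Int) → List (Int × Int) →
    Int × Int × Int × Int × Int × Int × Int × Int
  | st, [] => st
  | (a,b,c,d,e,f,g,h), (k,w) :: rest =>
    let t1 := PySem.Int.band (h + pvBSig1 e + pvCh e f g + k + w) pvM32
    let t2 := PySem.Int.band (pvBSig0 a + pvMaj a b c) pvM32
    pvRoundsB (PySem.Int.band (t1+t2) pvM32, a, b, c, PySem.Int.band (d+t1) pvM32, e, f, g) rest

def sha256_nr_alt (W : List Int) (n_rounds : Int) : List Int :=
  let ws := pvExtendB (PySem.List.slice W none (some 16)) (max n_rounds 16 - 16).toNat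
  let kws := (PySem.List.pyRange 0 n_rounds 1).map
    (fun r => (PySem.List.pyGetD pvK256 r 0, PySem.List.pyGetD ws r 0))
  match pvRoundsB ((0x6a09e667 : Int), (0xbb67ae85 : Int), (0x3c6ef372 : Int), (0xa54ff53a : Int),
      (0x510e527f : Int), (0x9b05688c : Int), (0x1f83d9ab : Int), (0x5be0cd19 : Int)) kws with
  | (a,b,c,d,e,f,g,h) =>
    (pvIV.zip [a,b,c,d,e,f,g,h]).map (fun p => PySem.Int.band (p.1 + p.2) pvM32)

-- ===== PRECONDITION & SPEC =====
-- Pre_ is exactly where A returns: past round 63 K256[r] raises IndexError, and with fewer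
-- than 16 message words either the schedule extension or Ws[r] raises IndexError.
def Pre_sha256_nr (W : List Int) (n_rounds : Int) : Prop :=
  n_rounds ≤ 64 ∧ (n_rounds ≤ (W.length : Int) ∨ 16 ≤ (W.length : Int))
instance (W : List Int) (n_rounds : Int) : Decidable (Pre_sha256_nr W n_rounds) := by
  unfold Pre_sha256_nr; infer_instance

def pvWitness_sha256_nr : List Int × Int :=
  ([1,2,3,4,5,6,7,8,9,10,11,12,13,14,15,16], 64)

def Spec_sha256_nr (W : List Int) (n_rounds : Int) (out : List Int) : Prop := out = sha256_nr_alt W n_rounds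
instance (W : List Int) (n_rounds : Int) (out : List Int) : Decidable (Spec_sha256_nr W n_rounds out) := by unfold Spec_sha256_nr; infer_instance

-- ===== CLAIM (what is proved, stated in full; the proofs are below) =====
def Claim_equal_sha256_nr : Prop := ∀ (W : List Int) (n_rounds : Int), Dom_sha256_nr W n_rounds → Pre_sha256_nr W n_rounds → Spec_sha256_nr W n_rounds (sha256_nr W n_rounds)

-- ===== LEMMAS AND PROOFS =====

-- the round core abstracted over the round constant and schedule word (A's inline body)
def pvCore (st : Int × Int × Int × Int × Int × Int × Int × Int) (kr w : Int) :
    Int × Int × Int × Int × Int × Int × Int × Int :=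
  match st with
  | (a,b,c,d,e,f,g,h) =>
    let S1 := PySem.Int.bxor (PySem.Int.bxor (pvRotr e 6) (pvRotr e 11)) (pvRotr e 25)
    let ch := PySem.Int.bxor (PySem.Int.band e f) (PySem.Int.band (PySem.Int.band (Int.not e) g) pvM32)
    let t1 := PySem.Int.band (h + S1 + ch + kr + w) pvM32
    let S0 := PySem.Int.bxor (PySem.Int.bxor (pvRotr a 2) (pvRotr a 13)) (pvRotr a 22)
    let mj := PySem.Int.bxor (PySem.Int.bxor (PySem.Int.band a b) (PySem.Int.band a c)) (PySem.Int.band b c)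
    let t2 := PySem.Int.band (S0 + mj) pvM32
    (PySem.Int.band (t1+t2) pvM32, a, b, c, PySem.Int.band (d+t1) pvM32, e, f, g)

-- A's schedule-extension word computed from the list ws at position i
def pvNext (ws : List Int) (i : Int) : Int :=
  let s0 := PySem.Int.bxor
    (PySem.Int.bxor (pvRotr (PySem.List.pyGetD ws (i-15) 0) 7)
                    (pvRotr (PySem.List.pyGetD ws (i-15) 0) 18))
    ((PySem.List.pyGetD ws (i-15) 0) >>> (3:Nat))
  let s1 := PySem.Int.bxor
    (PySem.Int.bxor (pvRotr (PySem.List.pyGetD ws (i-2) 0) 17)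
                    (pvRotr (PySem.List.pyGetD ws (i-2) 0) 19))
    ((PySem.List.pyGetD ws (i-2) 0) >>> (10:Nat))
  PySem.Int.band (PySem.List.pyGetD ws (i-16) 0 + s0 + PySem.List.pyGetD ws (i-7) 0 + s1) pvM32

def pvInit : Int × Int × Int × Int × Int × Int × Int × Int :=
  ((0x6a09e667 : Int), (0xbb67ae85 : Int), (0x3c6ef372 : Int), (0xa54ff53a : Int),
   (0x510e527f : Int), (0x9b05688c : Int), (0x1f83d9ab : Int), (0x5be0cd19 : Int))

def pvWs0 (W : List Int) : List Int := PySem.List.slice W none (some 16)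

def pvExt (ws : List Int) (i : Int) : List Int := ws ++ [pvNext ws i]

def pvE (W : List Int) (m : Int) : List Int :=
  (PySem.List.pyRange 16 m 1).foldl pvExt (pvWs0 W)

def pvWsF (W : List Int) (n : Int) : List Int := pvE W (max n 16)

def pvFinal (st : Int × Int × Int × Int × Int × Int × Int × Int) : List Int :=
  match st with
  | (a,b,c,d,e,f,g,h) =>
    (PySem.List.enumerate [a,b,c,d,e,f,g,h] 0).map
      (fun p => PySem.Int.band (PySem.List.pyGetD pvIV p.1 0 + p.2) pvM32)

def pvBodyA (Ws : List Int) (st : Int × Int × Int × Int × Int × Int × Int × Int) (r : Int) :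
    Int × Int × Int × Int × Int × Int × Int × Int :=
  pvCore st (PySem.List.pyGetD pvK256 r 0) (PySem.List.pyGetD Ws r 0)

theorem pvA_eq (W : List Int) (n : Int) :
    sha256_nr W n = pvFinal ((PySem.List.pyRange 0 n 1).foldl (pvBodyA (pvWsF W n)) pvInit) := by
  rfl

-- B's final zip-map agrees with A's enumerate-map on any 8-tuple
theorem pvFinalB_eq (st : Int × Int × Int × Int × Int × Int × Int × Int) :
    (match st with
     | (a,b,c,d,e,f,g,h) =>
       (pvIV.zip [a,b,c,d,e,f,g,h]).map (fun p => PySem.Int.band (p.1 + p.2) pvM32))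
    = pvFinal st := by
  rcases st with ⟨a,b,c,d,e,f,g,h⟩
  rfl

-- B's port with its local lets expanded, the final step expressed through pvFinal
theorem pvB_eq (W : List Int) (n : Int) :
    sha256_nr_alt W n
      = pvFinal (pvRoundsB pvInit ((PySem.List.pyRange 0 n 1).map
          (fun r => (PySem.List.pyGetD pvK256 r 0,
                     PySem.List.pyGetD (pvExtendB (pvWs0 W) (max n 16 - 16).toNat) r 0)))) :=
  pvFinalB_eq _

-- B's recursive rounds are the fold of the round core over the pair list
theorem pvRoundsB_foldl (l : List (Int × Int)) (st : Int × Int × Int × Int × Int × Int × Int × Int) :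
    pvRoundsB st l = l.foldl (fun st p => pvCore st p.1 p.2) st := by
  induction l generalizing st with
  | nil => rfl
  | cons p rest ih =>
    rcases st with ⟨a,b,c,d,e,f,g,h⟩
    rcases p with ⟨k,w⟩
    rw [List.foldl_cons, ← ih]
    rfl

-- B's extension word (negative indices) is A's pvNext at position ws.length
theorem pvNextB_eq (ws : List Int) (h16 : 16 ≤ ws.length) :
    PySem.Int.band
      (PySem.List.pyGetD ws (-16) 0 + pvSig0 (PySem.List.pyGetD ws (-15) 0)
        + PySem.List.pyGetD ws (-7) 0 + pvSig1 (PySem.List.pyGetD ws (-2) 0)) pvM32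
    = pvNext ws (ws.length : Int) := by
  unfold pvNext pvSig0 pvSig1
  rw [PySem.List.pyGetD_neg_ofNat ws 16 0 (by omega) h16,
      PySem.List.pyGetD_neg_ofNat ws 15 0 (by omega) (by omega),
      PySem.List.pyGetD_neg_ofNat ws 7 0 (by omega) (by omega),
      PySem.List.pyGetD_neg_ofNat ws 2 0 (by omega) (by omega)]
  have e15 : ((ws.length : Int) - 15) = ((ws.length - 15 : Nat) : Int) := by omega
  have e2 : ((ws.length : Int) - 2) = ((ws.length - 2 : Nat) : Int) := by omega
  have e16 : ((ws.length : Int) - 16) = ((ws.length - 16 : Nat) : Int) := by omega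
  have e7 : ((ws.length : Int) - 7) = ((ws.length - 7 : Nat) : Int) := by omega
  rw [e15, e2, e16, e7,
      PySem.List.pyGetD_natCast, PySem.List.pyGetD_natCast,
      PySem.List.pyGetD_natCast, PySem.List.pyGetD_natCast]
  rw [List.getD_eq_getElem ws 0 (by omega), List.getD_eq_getElem ws 0 (by omega),
      List.getD_eq_getElem ws 0 (by omega), List.getD_eq_getElem ws 0 (by omega)]

-- B's recursive extension equals A's fold of pvExt over the index range
theorem pvExtendB_foldl : ∀ (count : Nat) (ws : List Int), 16 ≤ ws.length →
    pvExtendB ws count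
      = (PySem.List.pyRange (ws.length : Int) ((ws.length : Int) + count) 1).foldl pvExt ws := by
  intro count
  induction count with
  | zero =>
    intro ws _
    rw [PySem.List.pyRange_one_eq_nil (by omega)]
    rfl
  | succ count ih =>
    intro ws h16
    rw [PySem.List.pyRange_one_cons (by omega), List.foldl_cons]
    show pvExtendB (ws ++ [_]) count = _
    rw [pvNextB_eq ws h16]
    have ih' := ih (ws ++ [pvNext ws (ws.length : Int)]) (by simp; omega)
    simp only [List.length_append, List.length_cons, List.length_nil] at ih'
    rw [ih']
    rw [show ((ws.length + (0 + 1) : Nat) : Int) = (ws.length : Int) + 1 by push_cast; ring,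
        show (ws.length : Int) + ((count + 1 : Nat) : Int)
            = ((ws.length : Int) + 1) + ((count : Nat) : Int) by push_cast; ring]
    rfl

theorem pvWsF_small (W : List Int) (n : Int) (hn : n ≤ 16) : pvWsF W n = pvWs0 W := by
  unfold pvWsF pvE
  rw [show max n 16 = 16 by omega, PySem.List.pyRange_one_eq_nil (by omega)]
  rfl

-- B's schedule equals A's, under Pre_
theorem pvSched_eq (W : List Int) (n : Int) (hPre : Pre_sha256_nr W n) :
    pvExtendB (pvWs0 W) (max n 16 - 16).toNat = pvWsF W n := by
  by_cases hn : n ≤ 16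
  · rw [show (max n 16 - 16).toNat = 0 by omega, pvWsF_small W n hn]
    rfl
  · have hW : 16 ≤ (W.length : Int) := by
      rcases hPre with ⟨_, h | h⟩ <;> omega
    have hlen : (pvWs0 W).length = 16 := by
      unfold pvWs0
      simp [pysem]
      omega
    rw [pvExtendB_foldl _ _ (by omega), hlen]
    unfold pvWsF pvE
    rw [show max n 16 = n by omega,
        show ((16 : Nat) : Int) = (16 : Int) by norm_num,
        show (16 : Int) + (((n - 16).toNat : Nat) : Int) = n by omega]

-- ===== VERDICT (by name: the statement is the Claim_ definition above) =====
theorem sha256_nr_spec : Claim_equal_sha256_nr := by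
  unfold Claim_equal_sha256_nr
  intro W n hDom hPre
  unfold Spec_sha256_nr
  rw [pvA_eq, pvB_eq, pvSched_eq W n hPre, pvRoundsB_foldl, List.foldl_map]
  rfl
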